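-- pv_equiv track=rewrite | github.com/ali1140/Go-fish-BlackJack-using-openCV-and-CNN-for-machine-learning | percobaan_maut.py | kalo_empat
-- ===== SOURCE A (Python) =====
-- card_image = []
--
-- def kalo_empat(deck):
--     card_groups = {}
--
--     for card in deck:
--         card_name, value, card_image = card
--         suit = card_name.split()[-1]
--
--         if value not in card_groups:
--             card_groups[value] = set()
--
--         card_groups[value].add(suit)
--
--     for value, suits in card_groups.items():
--         if len(suits) == 4:
--             return True
--
--     return False
-- ===== SOURCE B (Python) =====
-- def kalo_empat(deck):
--     seen = {(value, card_name.split()[-1]) for card_name, value, _ in deck}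
--     values = [value for value, _ in seen]
--     return any(values.count(value) == 4 for value in values)
-- ===== Notes on version B (the rewrite author's own statement) =====
-- stated objective: alternative
-- what changed: Instead of incrementally grouping suits into a dict of value->set and scanning its entries, B builds one flat set of (value, suit) pairs in a single comprehension and then checks whether any value occurs 4 times among the deduplicated pairs by counting.
import Mathlib
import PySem

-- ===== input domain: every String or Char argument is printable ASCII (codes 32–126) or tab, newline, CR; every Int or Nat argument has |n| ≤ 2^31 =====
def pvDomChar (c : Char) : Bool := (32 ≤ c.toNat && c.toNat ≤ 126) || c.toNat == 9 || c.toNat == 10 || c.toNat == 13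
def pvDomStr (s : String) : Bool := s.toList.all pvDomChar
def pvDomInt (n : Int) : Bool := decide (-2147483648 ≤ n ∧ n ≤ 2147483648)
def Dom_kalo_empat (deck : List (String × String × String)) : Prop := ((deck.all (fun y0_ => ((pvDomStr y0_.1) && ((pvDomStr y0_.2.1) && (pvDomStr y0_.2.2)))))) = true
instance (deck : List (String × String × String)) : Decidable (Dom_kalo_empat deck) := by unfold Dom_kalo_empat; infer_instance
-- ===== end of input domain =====

-- B replaces A's incrementally grouped dict of value -> suit-set by one flat set of (value, suit) pairs plus a per-value count; equal return values on Pre_.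

-- ===== PORT A =====
-- suit = card_name.split()[-1]; Pre_ guarantees the index is in range (the getD "" default is never reached inside Pre_).
def kalo_empat (deck : List (String × String × String)) : Bool :=
  let card_groups : PySem.Dict String (PySem.Set String) :=
    deck.foldl (fun d card =>
      let suit : String := (PySem.List.pyGet? (PySem.Str.split₀ card.1) (-1)).getD ""
      let d' := if d.contains card.2.1 then d else d.insert card.2.1 PySem.Set.empty
      d'.insert card.2.1 (PySem.Set.add (d'.getD card.2.1 PySem.Set.empty) suit))
      PySem.Dict.empty
  -- for value, suits in card_groups.items(): if len(suits) == 4: return True / return False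
  card_groups.items.any (fun p => p.2.length == 4)

-- ===== PORT B =====
def kalo_empat_alt (deck : List (String × String × String)) : Bool :=
  let seen : PySem.Set (String × String) :=
    PySem.Set.ofList (deck.map (fun card =>
      (card.2.1, (PySem.List.pyGet? (PySem.Str.split₀ card.1) (-1)).getD "")))
  let values : List String := seen.map (fun p => p.1)
  values.any (fun v => values.count v == 4)

-- ===== PRECONDITION & SPEC =====
-- Pre_ excludes exactly the decks containing a card whose name has no whitespace-separated word
-- (empty/whitespace-only name): there Python A raises IndexError on split()[-1] (and so does B).
def Pre_kalo_empat (deck : List (String × String × String)) : Prop :=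
  ∀ card ∈ deck, PySem.Str.split₀ card.1 ≠ []
instance (deck : List (String × String × String)) : Decidable (Pre_kalo_empat deck) := by
  unfold Pre_kalo_empat; infer_instance

def pvWitness_kalo_empat : (List (String × String × String)) :=
  [("ace of spades", "ace", "img"), ("ace of hearts", "ace", "img")]

def Spec_kalo_empat (deck : List (String × String × String)) (out : Bool) : Prop := out = kalo_empat_alt deck
instance (deck : List (String × String × String)) (out : Bool) : Decidable (Spec_kalo_empat deck out) := by unfold Spec_kalo_empat; infer_instance

-- ===== CLAIM (what is proved, stated in full; the proofs are below) =====
def Claim_equal_kalo_empat : Prop := ∀ (deck : List (String × String × String)), Dom_kalo_empat deck → Pre_kalo_empat deck → Spec_kalo_empat deck (kalo_empat deck)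

-- ===== LEMMAS AND PROOFS =====

def pvStep (d : PySem.Dict String (PySem.Set String)) (q : String × String) :
    PySem.Dict String (PySem.Set String) :=
  let d' := if d.contains q.1 then d else d.insert q.1 PySem.Set.empty
  d'.insert q.1 (PySem.Set.add (d'.getD q.1 PySem.Set.empty) q.2)

lemma pvFilterAdd (S : PySem.Set (String × String)) (x : String × String) (v : String) :
    ((PySem.Set.add S x).filter (fun p => p.1 == v)).map (·.2)
      = if x.1 = v
        then PySem.Set.add ((S.filter (fun p => p.1 == v)).map (·.2)) x.2
        else (S.filter (fun p => p.1 == v)).map (·.2) := by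
  by_cases hmem : x ∈ S
  · rw [show PySem.Set.add S x = S from by simp [PySem.Set.add, PySem.Set.contains, hmem]]
    by_cases hv : x.1 = v
    · have h2 : x.2 ∈ (S.filter (fun p => p.1 == v)).map (·.2) := by
        refine List.mem_map.mpr ⟨x, ?_, rfl⟩
        simp [List.mem_filter, hmem, hv]
      simp [hv, PySem.Set.add, PySem.Set.contains, h2]
    · simp [hv]
  · rw [show PySem.Set.add S x = S ++ [x] from by
      simp [PySem.Set.add, PySem.Set.contains, hmem]]
    by_cases hv : x.1 = v
    · have h2 : x.2 ∉ (S.filter (fun p => p.1 == v)).map (·.2) := by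
        intro h
        rcases List.mem_map.mp h with ⟨p, hp, hp2⟩
        rcases List.mem_filter.mp hp with ⟨hpS, hpv⟩
        have : p = x := by
          have : p.1 = v := by simpa using hpv
          cases p; cases x; simp_all
        exact hmem (this ▸ hpS)
      simp [List.filter_append, hv, PySem.Set.add, PySem.Set.contains, h2]
    · simp [List.filter_append, hv]

lemma pvInv (l : List (String × String)) :
    (∀ v, (l.foldl pvStep PySem.Dict.empty).getD v PySem.Set.empty
        = ((PySem.Set.ofList l).filter (fun p => p.1 == v)).map (·.2))
    ∧ (∀ v, (l.foldl pvStep PySem.Dict.empty).contains v = l.any (fun p => p.1 == v))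
    ∧ (l.foldl pvStep PySem.Dict.empty).keys.Nodup := by
  induction l using List.reverseRecOn with
  | nil => simp [PySem.Set.ofList]
  | append_singleton l x ih =>
    obtain ⟨ihg, ihc, ihn⟩ := ih
    rw [List.foldl_append] at *
    have hS : PySem.Set.ofList (l ++ [x]) = PySem.Set.add (PySem.Set.ofList l) x := by
      simp [PySem.Set.ofList_eq_foldl, List.foldl_append]
    set d := l.foldl pvStep PySem.Dict.empty with hd
    have hgd' : (if d.contains x.1 then d else d.insert x.1 PySem.Set.empty).getD x.1 PySem.Set.empty
        = d.getD x.1 PySem.Set.empty := by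
      by_cases h : d.contains x.1 = true
      · simp [h]
      · rw [if_neg (by simp [h]), PySem.Dict.getD_insert_self,
          PySem.Dict.getD_of_not_contains d _ (Bool.not_eq_true _ ▸ h)]
    refine ⟨?_, ?_, ?_⟩
    · intro v
      rw [hS, pvFilterAdd]
      by_cases hv : x.1 = v
      · subst hv
        simp only [pvStep, List.foldl_cons, List.foldl_nil]
        rw [PySem.Dict.getD_insert_self, hgd', ihg, if_pos trivial]
      · rw [if_neg hv]
        show ((if d.contains x.1 then d else d.insert x.1 PySem.Set.empty).insert x.1 _).getD v PySem.Set.empty = _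
        rw [PySem.Dict.getD_insert_of_ne _ _ _ (fun h => hv h.symm)]
        by_cases h : d.contains x.1 = true
        · rw [if_pos h, ihg]
        · rw [if_neg (by simp [h]), PySem.Dict.getD_insert_of_ne _ _ _ (fun h => hv h.symm), ihg]
    · intro v
      show ((if d.contains x.1 then d else d.insert x.1 PySem.Set.empty).insert x.1 _).contains v = _
      have hb : (v == x.1) = (x.1 == v) := by
        by_cases hv : v = x.1
        · subst hv; rfl
        · have hv' : ¬ x.1 = v := fun hh => hv hh.symm
          simp [hv, hv']
      by_cases h : d.contains x.1 = true
      · rw [if_pos h, PySem.Dict.contains_insert, hb, ihc, List.any_append,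
          List.any_cons, List.any_nil]
        cases hx : (x.1 == v) <;> simp
      · rw [if_neg (by simp [h]), PySem.Dict.contains_insert, PySem.Dict.contains_insert, hb,
          ihc, List.any_append, List.any_cons, List.any_nil]
        cases hx : (x.1 == v) <;> simp
    · show ((if d.contains x.1 then d else d.insert x.1 PySem.Set.empty).insert x.1 _).keys.Nodup
      by_cases h : d.contains x.1 = true
      · rw [if_pos h]; exact PySem.Dict.nodup_keys_insert _ _ _ ihn
      · rw [if_neg (by simp [h])]
        exact PySem.Dict.nodup_keys_insert _ _ _ (PySem.Dict.nodup_keys_insert _ _ _ ihn)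


lemma pvCount (S : PySem.Set (String × String)) (k : String) :
    ((S.filter (fun p => p.1 == k)).map (fun p => (p : String × String).2)).length
      = (S.map (fun p => (p : String × String).1)).count k := by
  rw [List.length_map, List.count, List.countP_map, ← List.countP_eq_length_filter]
  rfl


-- ===== VERDICT (by name: the statement is the Claim_ definition above) =====
theorem kalo_empat_spec : Claim_equal_kalo_empat := by
  intro deck _ _
  unfold Spec_kalo_empat kalo_empat kalo_empat_alt

  have hfold :
      (deck.map (fun card =>
        (card.2.1, (PySem.List.pyGet? (PySem.Str.split₀ card.1) (-1)).getD ""))).foldl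
          pvStep PySem.Dict.empty
      = deck.foldl (fun d card =>
          let suit : String := (PySem.List.pyGet? (PySem.Str.split₀ card.1) (-1)).getD ""
          let d' := if d.contains card.2.1 then d else d.insert card.2.1 PySem.Set.empty
          d'.insert card.2.1 (PySem.Set.add (d'.getD card.2.1 PySem.Set.empty) suit))
          PySem.Dict.empty := by
    rw [List.foldl_map]; rfl
  set l := deck.map (fun card =>
    (card.2.1, (PySem.List.pyGet? (PySem.Str.split₀ card.1) (-1)).getD "")) with hl
  show (deck.foldl (fun d card =>
          let suit : String := (PySem.List.pyGet? (PySem.Str.split₀ card.1) (-1)).getD ""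
          let d' := if d.contains card.2.1 then d else d.insert card.2.1 PySem.Set.empty
          d'.insert card.2.1 (PySem.Set.add (d'.getD card.2.1 PySem.Set.empty) suit))
          PySem.Dict.empty).items.any (fun p => p.2.length == 4)
      = ((PySem.Set.ofList l).map (fun p => p.1)).any
          (fun v => (((PySem.Set.ofList l).map (fun p => p.1)).count v == 4))
  rw [← hfold]
  obtain ⟨hg, hc, hn⟩ := pvInv l
  rw [PySem.Dict.items_eq_map_keys _ hn PySem.Set.empty]
  apply Bool.coe_iff_coe.mp
  simp only [List.any_eq_true, List.mem_map]
  constructor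
  · rintro ⟨p, ⟨k, hk, rfl⟩, hP⟩
    simp only [beq_iff_eq] at hP
    rw [hg k, pvCount] at hP
    have hkm := (PySem.Dict.contains_iff_mem_keys _ _).mpr hk
    rw [hc k, List.any_eq_true] at hkm
    obtain ⟨q, hq, hq1⟩ := hkm
    refine ⟨k, ⟨q, (PySem.Set.mem_ofList l q).mpr hq, by simpa using hq1⟩, ?_⟩
    simpa using hP
  · rintro ⟨v, ⟨q, hq, rfl⟩, hP⟩
    simp only [beq_iff_eq] at hP ⊢
    have hkm : q.1 ∈ (l.foldl pvStep PySem.Dict.empty).keys := by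
      rw [← PySem.Dict.contains_iff_mem_keys, hc, List.any_eq_true]
      exact ⟨q, (PySem.Set.mem_ofList l q).mp hq, by simp⟩
    refine ⟨_, ⟨q.1, hkm, rfl⟩, ?_⟩
    rw [hg q.1, pvCount]
    exact hP
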